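-- pv_equiv track=rewrite | github.com/vladbortnik/TLDRx | parse_commands.py | split_large_category
-- ===== SOURCE A (Python) =====
-- from typing import Dict, List, Any
--
-- def split_large_category(commands: List[Dict[str, Any]], category: str, max_commands_per_file: int = 100) -> Dict[str, List[Dict[str, Any]]]:
--     """Split a large category into multiple subcategories."""
--     if len(commands) <= max_commands_per_file:
--         return {category: commands}
--
--     # For development category, split by common patterns
--     if category == "development":
--         subcategories = {
--             "development-web": [],
--             "development-database": [],
--             "development-containers": [],
--             "development-languages": [],
--             "development-tools": [],
--             "development-git": [],
--             "development-build": []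
--         }
--
--         for cmd in commands:
--             name = cmd.get('name', '').lower()
--             description = cmd.get('description', '').lower()
--
--             # Categorize by command name and description
--             if any(term in name or term in description for term in ['web', 'http', 'api', 'rest', 'server', 'nginx', 'apache']):
--                 subcategories["development-web"].append(cmd)
--             elif any(term in name or term in description for term in ['sql', 'database', 'db', 'mongo', 'postgres', 'mysql', 'redis']):
--                 subcategories["development-database"].append(cmd)
--             elif any(term in name or term in description for term in ['docker', 'container', 'kubernetes', 'k8s', 'helm']):
--                 subcategories["development-containers"].append(cmd)
--             elif any(term in name or term in description for term in ['git', 'github', 'gitlab', 'commit', 'branch']):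
--                 subcategories["development-git"].append(cmd)
--             elif any(term in name or term in description for term in ['build', 'compile', 'maven', 'gradle', 'make', 'cmake', 'ant']):
--                 subcategories["development-build"].append(cmd)
--             elif any(term in name or term in description for term in ['python', 'node', 'npm', 'php', 'java', 'ruby', 'go']):
--                 subcategories["development-languages"].append(cmd)
--             else:
--                 subcategories["development-tools"].append(cmd)
--
--         # Remove empty subcategories
--         return {k: v for k, v in subcategories.items() if v}
--
--     # For other large categories, split numerically
--     chunks = {}
--     chunk_size = max_commands_per_file
--     for i in range(0, len(commands), chunk_size):
--         chunk_num = i // chunk_size + 1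
--         chunk_name = f"{category}-{chunk_num}"
--         chunks[chunk_name] = commands[i:i + chunk_size]
--
--     return chunks
-- ===== SOURCE B (Python) =====
-- RULES = [
--     ("development-web", ("web", "http", "api", "rest", "server", "nginx", "apache")),
--     ("development-database", ("sql", "database", "db", "mongo", "postgres", "mysql", "redis")),
--     ("development-containers", ("docker", "container", "kubernetes", "k8s", "helm")),
--     ("development-git", ("git", "github", "gitlab", "commit", "branch")),
--     ("development-build", ("build", "compile", "maven", "gradle", "make", "cmake", "ant")),
--     ("development-languages", ("python", "node", "npm", "php", "java", "ruby", "go")),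
-- ]
--
-- ORDER = ["development-web", "development-database", "development-containers",
--          "development-languages", "development-tools", "development-git",
--          "development-build"]
--
--
-- def _matches(cmd, terms):
--     name = cmd.get('name', '').lower()
--     description = cmd.get('description', '').lower()
--     return any(t in name or t in description for t in terms)
--
--
-- def _chunks(category, size, rest, n):
--     if size <= 0 or not rest:
--         return {}
--     out = {f"{category}-{n}": rest[:size]}
--     out.update(_chunks(category, size, rest[size:], n + 1))
--     return out
--
--
-- def split_large_category(commands, category, max_commands_per_file=100):
--     """Split a large category into subcategories by staged partitioning
--     (one sieve pass per rule), or recursively into numbered chunks."""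
--     if len(commands) <= max_commands_per_file:
--         return {category: commands}
--
--     if category == "development":
--         remaining = commands
--         matched = {}
--         for key, terms in RULES:
--             matched[key] = [c for c in remaining if _matches(c, terms)]
--             remaining = [c for c in remaining if not _matches(c, terms)]
--         matched["development-tools"] = remaining
--         return {k: matched[k] for k in ORDER if matched[k]}
--
--     return _chunks(category, max_commands_per_file, commands, 1)
-- ===== Notes on version B (the rewrite author's own statement) =====
-- stated objective: alternative
-- what changed: The development branch replaces A's single pass that dispatches each command into a dict of accumulator lists via an if/elif chain by a staged sieve: one filter pass per rule over a shrinking 'remaining' list, buckets assembled afterwards in the original key order; numeric chunking replaces A's stepped-range dict-insertion loop by a recursion that consumes the list chunk by chunk.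
import Mathlib
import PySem

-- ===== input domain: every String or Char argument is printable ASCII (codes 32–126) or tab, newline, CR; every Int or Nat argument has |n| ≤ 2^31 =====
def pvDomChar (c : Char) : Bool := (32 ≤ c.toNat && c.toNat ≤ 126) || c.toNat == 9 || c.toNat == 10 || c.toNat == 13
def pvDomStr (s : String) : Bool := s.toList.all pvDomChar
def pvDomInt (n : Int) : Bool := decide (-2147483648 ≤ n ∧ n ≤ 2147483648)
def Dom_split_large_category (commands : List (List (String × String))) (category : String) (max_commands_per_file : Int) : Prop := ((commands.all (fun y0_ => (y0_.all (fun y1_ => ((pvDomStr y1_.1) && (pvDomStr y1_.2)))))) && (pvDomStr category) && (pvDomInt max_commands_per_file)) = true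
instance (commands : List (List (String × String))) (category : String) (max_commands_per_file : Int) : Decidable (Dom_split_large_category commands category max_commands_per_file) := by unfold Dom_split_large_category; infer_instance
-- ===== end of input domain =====

-- B replaces A's single-pass first-match dispatch into a dict of accumulator lists by a staged
-- sieve: one filter pass per rule over a shrinking "remaining" list; and A's stepped-range dict
-- insertion loop for numeric chunking by a recursion that consumes the list (objective: alternative).

-- ===== PORT A =====
def split_large_category (commands : List (List (String × String))) (category : String) (max_commands_per_file : Int) : List (String × List (List (String × String))) :=
  if (commands.length : Int) ≤ max_commands_per_file then [(category, commands)]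
  else if category = "development" then
    let subcategories : PySem.Dict String (List (List (String × String))) :=
      ((((((PySem.Dict.empty.insert "development-web" []).insert "development-database" []).insert
          "development-containers" []).insert "development-languages" []).insert
          "development-tools" []).insert "development-git" []).insert "development-build" []
    let final := commands.foldl (fun d cmd =>
      let name := PySem.Str.lower ((PySem.Dict.mk cmd).getD "name" "")
      let description := PySem.Str.lower ((PySem.Dict.mk cmd).getD "description" "")
      if (["web", "http", "api", "rest", "server", "nginx", "apache"].any
            fun t => PySem.Str.isIn t name || PySem.Str.isIn t description) then
        d.modify "development-web" [] (· ++ [cmd])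
      else if (["sql", "database", "db", "mongo", "postgres", "mysql", "redis"].any
            fun t => PySem.Str.isIn t name || PySem.Str.isIn t description) then
        d.modify "development-database" [] (· ++ [cmd])
      else if (["docker", "container", "kubernetes", "k8s", "helm"].any
            fun t => PySem.Str.isIn t name || PySem.Str.isIn t description) then
        d.modify "development-containers" [] (· ++ [cmd])
      else if (["git", "github", "gitlab", "commit", "branch"].any
            fun t => PySem.Str.isIn t name || PySem.Str.isIn t description) then
        d.modify "development-git" [] (· ++ [cmd])
      else if (["build", "compile", "maven", "gradle", "make", "cmake", "ant"].any
            fun t => PySem.Str.isIn t name || PySem.Str.isIn t description) then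
        d.modify "development-build" [] (· ++ [cmd])
      else if (["python", "node", "npm", "php", "java", "ruby", "go"].any
            fun t => PySem.Str.isIn t name || PySem.Str.isIn t description) then
        d.modify "development-languages" [] (· ++ [cmd])
      else
        d.modify "development-tools" [] (· ++ [cmd])) subcategories
    final.items.filter (fun p => !p.2.isEmpty)
  else
    let chunk_size := max_commands_per_file
    let chunks := (PySem.List.pyRange 0 (commands.length : Int) chunk_size).foldl
      (fun d i =>
        d.insert (category ++ "-" ++ PySem.Int.toStr (PySem.Int.floordiv i chunk_size + 1))
          (PySem.List.slice commands (some i) (some (i + chunk_size))))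
      PySem.Dict.empty
    chunks.items

-- ===== PORT B =====
-- the RULES / ORDER constants of Source B
def pvT1 : List String := ["web", "http", "api", "rest", "server", "nginx", "apache"]
def pvT2 : List String := ["sql", "database", "db", "mongo", "postgres", "mysql", "redis"]
def pvT3 : List String := ["docker", "container", "kubernetes", "k8s", "helm"]
def pvT4 : List String := ["git", "github", "gitlab", "commit", "branch"]
def pvT5 : List String := ["build", "compile", "maven", "gradle", "make", "cmake", "ant"]
def pvT6 : List String := ["python", "node", "npm", "php", "java", "ruby", "go"]

def pvRules : List (String × List String) :=
  [("development-web", pvT1), ("development-database", pvT2), ("development-containers", pvT3),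
   ("development-git", pvT4), ("development-build", pvT5), ("development-languages", pvT6)]

def pvOrder : List String :=
  ["development-web", "development-database", "development-containers",
   "development-languages", "development-tools", "development-git", "development-build"]

-- _matches(cmd, terms)
def pvMatches (cmd : List (String × String)) (terms : List String) : Bool :=
  let name := PySem.Str.lower ((PySem.Dict.mk cmd).getD "name" "")
  let description := PySem.Str.lower ((PySem.Dict.mk cmd).getD "description" "")
  terms.any fun t => PySem.Str.isIn t name || PySem.Str.isIn t description

-- _chunks(category, size, rest, n); fuel (= the initial list length) only makes the
-- recursion structural — the size <= 0 / empty-rest guard is Source B's own base case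
def pvChunks (category : String) (size : Int) :
    Nat → List (List (String × String)) → Int → List (String × List (List (String × String)))
  | 0, _, _ => []
  | fuel + 1, rest, n =>
    if size ≤ 0 ∨ rest.isEmpty then []
    else
      (category ++ "-" ++ PySem.Int.toStr n, PySem.List.slice rest none (some size)) ::
        pvChunks category size fuel (PySem.List.slice rest (some size) none) (n + 1)

def split_large_category_alt (commands : List (List (String × String))) (category : String) (max_commands_per_file : Int) : List (String × List (List (String × String))) :=
  if (commands.length : Int) ≤ max_commands_per_file then [(category, commands)]
  else if category = "development" then
    let st := pvRules.foldl
      (fun (st : List (List (String × String)) × PySem.Dict String (List (List (String × String)))) rule =>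
        (st.1.filter (fun c => !pvMatches c rule.2),
         st.2.insert rule.1 (st.1.filter (fun c => pvMatches c rule.2))))
      (commands, PySem.Dict.empty)
    let matched := st.2.insert "development-tools" st.1
    (pvOrder.map (fun k => (k, matched.getD k []))).filter (fun p => !p.2.isEmpty)
  else
    pvChunks category max_commands_per_file commands.length commands 1

-- ===== PRECONDITION & SPEC =====
-- Pre_ excludes exactly the inputs on which A raises: max_commands_per_file = 0 with a nonempty
-- command list outside the "development" branch (range step 0 → ValueError).
def Pre_split_large_category (commands : List (List (String × String))) (category : String) (max_commands_per_file : Int) : Prop :=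
  max_commands_per_file ≠ 0 ∨ commands = [] ∨ category = "development"
instance (commands : List (List (String × String))) (category : String) (max_commands_per_file : Int) : Decidable (Pre_split_large_category commands category max_commands_per_file) := by unfold Pre_split_large_category; infer_instance

def pvWitness_split_large_category : (List (List (String × String))) × String × Int :=
  ([[("name", "git status")], [("name", "curl web")]], "development", 1)

def Spec_split_large_category (commands : List (List (String × String))) (category : String) (max_commands_per_file : Int) (out : List (String × List (List (String × String)))) : Prop := out = split_large_category_alt commands category max_commands_per_file
instance (commands : List (List (String × String))) (category : String) (max_commands_per_file : Int) (out : List (String × List (List (String × String)))) : Decidable (Spec_split_large_category commands category max_commands_per_file out) := by unfold Spec_split_large_category; infer_instance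

-- ===== CLAIM (what is proved, stated in full; the proofs are below) =====
def Claim_equal_split_large_category : Prop := ∀ (commands : List (List (String × String))) (category : String) (max_commands_per_file : Int), Dom_split_large_category commands category max_commands_per_file → Pre_split_large_category commands category max_commands_per_file → Spec_split_large_category commands category max_commands_per_file (split_large_category commands category max_commands_per_file)

-- ===== LEMMAS AND PROOFS =====

-- the first-match classification A's if/elif chain implements, as a function of the six match bits
def pvPick (b1 b2 b3 b4 b5 b6 : Bool) : String :=
  if b1 then "development-web"
  else if b2 then "development-database"
  else if b3 then "development-containers"
  else if b4 then "development-git"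
  else if b5 then "development-build"
  else if b6 then "development-languages"
  else "development-tools"

def pvCls (cmd : List (String × String)) : String :=
  pvPick (pvMatches cmd pvT1) (pvMatches cmd pvT2) (pvMatches cmd pvT3)
    (pvMatches cmd pvT4) (pvMatches cmd pvT5) (pvMatches cmd pvT6)

-- A's per-command step is "append cmd to the bucket pvCls picks"
theorem pv_step_eq (d : PySem.Dict String (List (List (String × String)))) (cmd : List (String × String)) :
    (let name := PySem.Str.lower ((PySem.Dict.mk cmd).getD "name" "")
     let description := PySem.Str.lower ((PySem.Dict.mk cmd).getD "description" "")
     if (["web", "http", "api", "rest", "server", "nginx", "apache"].any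
           fun t => PySem.Str.isIn t name || PySem.Str.isIn t description) then
       d.modify "development-web" [] (· ++ [cmd])
     else if (["sql", "database", "db", "mongo", "postgres", "mysql", "redis"].any
           fun t => PySem.Str.isIn t name || PySem.Str.isIn t description) then
       d.modify "development-database" [] (· ++ [cmd])
     else if (["docker", "container", "kubernetes", "k8s", "helm"].any
           fun t => PySem.Str.isIn t name || PySem.Str.isIn t description) then
       d.modify "development-containers" [] (· ++ [cmd])
     else if (["git", "github", "gitlab", "commit", "branch"].any
           fun t => PySem.Str.isIn t name || PySem.Str.isIn t description) then
       d.modify "development-git" [] (· ++ [cmd])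
     else if (["build", "compile", "maven", "gradle", "make", "cmake", "ant"].any
           fun t => PySem.Str.isIn t name || PySem.Str.isIn t description) then
       d.modify "development-build" [] (· ++ [cmd])
     else if (["python", "node", "npm", "php", "java", "ruby", "go"].any
           fun t => PySem.Str.isIn t name || PySem.Str.isIn t description) then
       d.modify "development-languages" [] (· ++ [cmd])
     else
       d.modify "development-tools" [] (· ++ [cmd]))
    = d.modify (pvCls cmd) [] (· ++ [cmd]) := by
  unfold pvCls pvPick pvMatches pvT1 pvT2 pvT3 pvT4 pvT5 pvT6
  split_ifs <;> simp_all

-- canonical form of the "development" split: each bucket is a filter by first-match class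
def pvCanon (commands : List (List (String × String))) : List (String × List (List (String × String))) :=
  (pvOrder.map (fun k => (k, commands.filter (fun c => pvCls c == k)))).filter (fun p => !p.2.isEmpty)

theorem pv_pick_mem (b1 b2 b3 b4 b5 b6 : Bool) : pvPick b1 b2 b3 b4 b5 b6 ∈ pvOrder := by
  revert b1 b2 b3 b4 b5 b6; decide

theorem pv_update_id (l : List String) (s : PySem.Set String) (h : ∀ x ∈ l, x ∈ s) :
    PySem.Set.update s l = s := by
  induction l generalizing s with
  | nil => rfl
  | cons x t ih =>
    have hadd : PySem.Set.add s x = s := by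
      simp [PySem.Set.add, PySem.Set.contains, h x (by simp)]
    show List.foldl PySem.Set.add s (x :: t) = s
    rw [List.foldl_cons, hadd]
    exact ih s fun y hy => h y (by simp [hy])

def pvD0 : PySem.Dict String (List (List (String × String))) :=
  ((((((PySem.Dict.empty.insert "development-web" []).insert "development-database" []).insert
      "development-containers" []).insert "development-languages" []).insert
      "development-tools" []).insert "development-git" []).insert "development-build" []

theorem pv_getD_d0 (k : String) : pvD0.getD k [] = [] := by
  simp only [pvD0, PySem.Dict.getD_insert]
  split_ifs <;> simp [PySem.Dict.getD_empty]

theorem pv_getD_fold (commands : List (List (String × String))) (k : String) :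
    (commands.foldl (fun d c => d.modify (pvCls c) [] (· ++ [c])) pvD0).getD k []
      = commands.filter (fun c => pvCls c == k) := by
  have hmap : commands.foldl (fun d c => d.modify (pvCls c) [] (· ++ [c])) pvD0
      = (commands.map (fun c => (pvCls c, c))).foldl (fun d p => d.modify p.1 [] (· ++ [p.2])) pvD0 := by
    rw [List.foldl_map]
  rw [hmap, PySem.Dict.getD_foldl_modify_append, pv_getD_d0, List.filter_map, List.map_map]
  simp [Function.comp_def]

theorem pv_dev_A (commands : List (List (String × String))) :
    (let subcategories : PySem.Dict String (List (List (String × String))) :=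
      ((((((PySem.Dict.empty.insert "development-web" []).insert "development-database" []).insert
          "development-containers" []).insert "development-languages" []).insert
          "development-tools" []).insert "development-git" []).insert "development-build" []
     let final := commands.foldl (fun d cmd =>
      let name := PySem.Str.lower ((PySem.Dict.mk cmd).getD "name" "")
      let description := PySem.Str.lower ((PySem.Dict.mk cmd).getD "description" "")
      if (["web", "http", "api", "rest", "server", "nginx", "apache"].any
            fun t => PySem.Str.isIn t name || PySem.Str.isIn t description) then
        d.modify "development-web" [] (· ++ [cmd])
      else if (["sql", "database", "db", "mongo", "postgres", "mysql", "redis"].any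
            fun t => PySem.Str.isIn t name || PySem.Str.isIn t description) then
        d.modify "development-database" [] (· ++ [cmd])
      else if (["docker", "container", "kubernetes", "k8s", "helm"].any
            fun t => PySem.Str.isIn t name || PySem.Str.isIn t description) then
        d.modify "development-containers" [] (· ++ [cmd])
      else if (["git", "github", "gitlab", "commit", "branch"].any
            fun t => PySem.Str.isIn t name || PySem.Str.isIn t description) then
        d.modify "development-git" [] (· ++ [cmd])
      else if (["build", "compile", "maven", "gradle", "make", "cmake", "ant"].any
            fun t => PySem.Str.isIn t name || PySem.Str.isIn t description) then
        d.modify "development-build" [] (· ++ [cmd])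
      else if (["python", "node", "npm", "php", "java", "ruby", "go"].any
            fun t => PySem.Str.isIn t name || PySem.Str.isIn t description) then
        d.modify "development-languages" [] (· ++ [cmd])
      else
        d.modify "development-tools" [] (· ++ [cmd])) subcategories
     final.items.filter (fun p => !p.2.isEmpty))
    = pvCanon commands := by
  show (commands.foldl _ pvD0).items.filter (fun p => !p.2.isEmpty) = pvCanon commands
  have hstep : List.foldl
    (fun d cmd =>
      let name := PySem.Str.lower ((PySem.Dict.mk cmd).getD "name" "")
      let description := PySem.Str.lower ((PySem.Dict.mk cmd).getD "description" "")
      if (["web", "http", "api", "rest", "server", "nginx", "apache"].any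
            fun t => PySem.Str.isIn t name || PySem.Str.isIn t description) then
        d.modify "development-web" [] (· ++ [cmd])
      else if (["sql", "database", "db", "mongo", "postgres", "mysql", "redis"].any
            fun t => PySem.Str.isIn t name || PySem.Str.isIn t description) then
        d.modify "development-database" [] (· ++ [cmd])
      else if (["docker", "container", "kubernetes", "k8s", "helm"].any
            fun t => PySem.Str.isIn t name || PySem.Str.isIn t description) then
        d.modify "development-containers" [] (· ++ [cmd])
      else if (["git", "github", "gitlab", "commit", "branch"].any
            fun t => PySem.Str.isIn t name || PySem.Str.isIn t description) then
        d.modify "development-git" [] (· ++ [cmd])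
      else if (["build", "compile", "maven", "gradle", "make", "cmake", "ant"].any
            fun t => PySem.Str.isIn t name || PySem.Str.isIn t description) then
        d.modify "development-build" [] (· ++ [cmd])
      else if (["python", "node", "npm", "php", "java", "ruby", "go"].any
            fun t => PySem.Str.isIn t name || PySem.Str.isIn t description) then
        d.modify "development-languages" [] (· ++ [cmd])
      else
        d.modify "development-tools" [] (· ++ [cmd]))
    pvD0 commands = List.foldl (fun d c => d.modify (pvCls c) [] (· ++ [c])) pvD0 commands :=
    List.foldl_ext _ _ _ (fun acc x _ => pv_step_eq acc x)
  rw [hstep]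
  have hkeys : (commands.foldl (fun d c => d.modify (pvCls c) [] (· ++ [c])) pvD0).keys = pvOrder := by
    rw [PySem.Dict.keys_foldl_modify_key]
    have hd0 : pvD0.keys = pvOrder := by decide
    rw [hd0]
    refine pv_update_id _ _ fun x hx => ?_
    obtain ⟨c, _, rfl⟩ := List.mem_map.mp hx
    exact pv_pick_mem _ _ _ _ _ _
  have hnd : (commands.foldl (fun d c => d.modify (pvCls c) [] (· ++ [c])) pvD0).keys.Nodup := by
    rw [hkeys]; decide
  rw [PySem.Dict.items_eq_map_keys _ hnd [], hkeys]
  unfold pvCanon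
  congr 1
  refine List.map_congr_left fun k _ => ?_
  rw [pv_getD_fold]

-- each sieve bucket of B is the first-match class of A
theorem pv_bucket_web (commands : List (List (String × String))) :
    commands.filter (fun c => pvMatches c pvT1)
      = commands.filter (fun c => pvCls c == "development-web") := by
  refine List.filter_congr fun c _ => ?_
  simp only [pvCls]
  generalize pvMatches c pvT1 = b1
  generalize pvMatches c pvT2 = b2
  generalize pvMatches c pvT3 = b3
  generalize pvMatches c pvT4 = b4
  generalize pvMatches c pvT5 = b5
  generalize pvMatches c pvT6 = b6
  revert b1 b2 b3 b4 b5 b6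
  decide

theorem pv_bucket_db (commands : List (List (String × String))) :
    commands.filter (fun a => pvMatches a pvT2 && !pvMatches a pvT1)
      = commands.filter (fun c => pvCls c == "development-database") := by
  refine List.filter_congr fun c _ => ?_
  simp only [pvCls]
  generalize pvMatches c pvT1 = b1
  generalize pvMatches c pvT2 = b2
  generalize pvMatches c pvT3 = b3
  generalize pvMatches c pvT4 = b4
  generalize pvMatches c pvT5 = b5
  generalize pvMatches c pvT6 = b6
  revert b1 b2 b3 b4 b5 b6
  decide

theorem pv_bucket_cont (commands : List (List (String × String))) :
    commands.filter (fun a => pvMatches a pvT3 && (!pvMatches a pvT2 && !pvMatches a pvT1))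
      = commands.filter (fun c => pvCls c == "development-containers") := by
  refine List.filter_congr fun c _ => ?_
  simp only [pvCls]
  generalize pvMatches c pvT1 = b1
  generalize pvMatches c pvT2 = b2
  generalize pvMatches c pvT3 = b3
  generalize pvMatches c pvT4 = b4
  generalize pvMatches c pvT5 = b5
  generalize pvMatches c pvT6 = b6
  revert b1 b2 b3 b4 b5 b6
  decide

theorem pv_bucket_git (commands : List (List (String × String))) :
    commands.filter (fun a => pvMatches a pvT4 && (!pvMatches a pvT3 && (!pvMatches a pvT2 && !pvMatches a pvT1)))
      = commands.filter (fun c => pvCls c == "development-git") := by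
  refine List.filter_congr fun c _ => ?_
  simp only [pvCls]
  generalize pvMatches c pvT1 = b1
  generalize pvMatches c pvT2 = b2
  generalize pvMatches c pvT3 = b3
  generalize pvMatches c pvT4 = b4
  generalize pvMatches c pvT5 = b5
  generalize pvMatches c pvT6 = b6
  revert b1 b2 b3 b4 b5 b6
  decide

theorem pv_bucket_build (commands : List (List (String × String))) :
    commands.filter (fun a => pvMatches a pvT5 && (!pvMatches a pvT4 && (!pvMatches a pvT3 && (!pvMatches a pvT2 && !pvMatches a pvT1))))
      = commands.filter (fun c => pvCls c == "development-build") := by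
  refine List.filter_congr fun c _ => ?_
  simp only [pvCls]
  generalize pvMatches c pvT1 = b1
  generalize pvMatches c pvT2 = b2
  generalize pvMatches c pvT3 = b3
  generalize pvMatches c pvT4 = b4
  generalize pvMatches c pvT5 = b5
  generalize pvMatches c pvT6 = b6
  revert b1 b2 b3 b4 b5 b6
  decide

theorem pv_bucket_lang (commands : List (List (String × String))) :
    commands.filter (fun a => pvMatches a pvT6 && (!pvMatches a pvT5 && (!pvMatches a pvT4 && (!pvMatches a pvT3 && (!pvMatches a pvT2 && !pvMatches a pvT1)))))
      = commands.filter (fun c => pvCls c == "development-languages") := by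
  refine List.filter_congr fun c _ => ?_
  simp only [pvCls]
  generalize pvMatches c pvT1 = b1
  generalize pvMatches c pvT2 = b2
  generalize pvMatches c pvT3 = b3
  generalize pvMatches c pvT4 = b4
  generalize pvMatches c pvT5 = b5
  generalize pvMatches c pvT6 = b6
  revert b1 b2 b3 b4 b5 b6
  decide

theorem pv_bucket_tools (commands : List (List (String × String))) :
    commands.filter (fun a => !pvMatches a pvT6 && (!pvMatches a pvT5 && (!pvMatches a pvT4 && (!pvMatches a pvT3 && (!pvMatches a pvT2 && !pvMatches a pvT1)))))
      = commands.filter (fun c => pvCls c == "development-tools") := by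
  refine List.filter_congr fun c _ => ?_
  simp only [pvCls]
  generalize pvMatches c pvT1 = b1
  generalize pvMatches c pvT2 = b2
  generalize pvMatches c pvT3 = b3
  generalize pvMatches c pvT4 = b4
  generalize pvMatches c pvT5 = b5
  generalize pvMatches c pvT6 = b6
  revert b1 b2 b3 b4 b5 b6
  decide

set_option maxHeartbeats 1000000 in
theorem pv_dev_B (commands : List (List (String × String))) :
    (let st := pvRules.foldl
      (fun (st : List (List (String × String)) × PySem.Dict String (List (List (String × String)))) rule =>
        (st.1.filter (fun c => !pvMatches c rule.2),
         st.2.insert rule.1 (st.1.filter (fun c => pvMatches c rule.2))))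
      (commands, PySem.Dict.empty)
     let matched := st.2.insert "development-tools" st.1
     (pvOrder.map (fun k => (k, matched.getD k []))).filter (fun p => !p.2.isEmpty))
    = pvCanon commands := by
  unfold pvCanon
  simp only [pvRules, List.foldl_cons, List.foldl_nil, pvOrder, List.map_cons, List.map_nil]
  simp only [PySem.Dict.getD_insert, List.filter_filter]
  simp only [String.reduceEq, reduceIte]
  simp only [pv_bucket_web, pv_bucket_db, pv_bucket_cont, pv_bucket_git, pv_bucket_build,
    pv_bucket_lang, pv_bucket_tools]

-- decimal value of a digit string, to prove Nat.toDigits injective (chunk names are distinct keys)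
def pvDval (c : Char) : Nat := c.toNat - 48
def pvVal (ds : List Char) : Nat := ds.foldl (fun a c => a * 10 + pvDval c) 0

theorem pvVal_append (xs : List Char) (c : Char) :
    pvVal (xs ++ [c]) = pvVal xs * 10 + pvDval c := by
  simp [pvVal, List.foldl_append]

theorem pv_toDigitsCore_append (b : Nat) (fuel : Nat) :
    ∀ (n : Nat) (ds : List Char),
      Nat.toDigitsCore b fuel n ds = Nat.toDigitsCore b fuel n [] ++ ds := by
  induction fuel with
  | zero => intro n ds; simp [Nat.toDigitsCore]
  | succ f ih =>
    intro n ds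
    simp only [Nat.toDigitsCore]
    by_cases h : n / b = 0
    · simp [h]
    · simp only [h, if_false]
      rw [ih (n / b) ((n % b).digitChar :: ds), ih (n / b) [(n % b).digitChar]]
      simp

theorem pvDval_digitChar (m : Nat) (h : m < 10) : pvDval (Nat.digitChar m) = m := by
  interval_cases m <;> rfl

theorem pvVal_toDigitsCore (fuel : Nat) :
    ∀ n, n < fuel → pvVal (Nat.toDigitsCore 10 fuel n []) = n := by
  induction fuel with
  | zero => intro n hn; omega
  | succ f ih =>
    intro n hn
    simp only [Nat.toDigitsCore]
    by_cases h : n / 10 = 0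
    · have hlt : n < 10 := by omega
      simp only [h, if_true]
      have : pvVal [(n % 10).digitChar] = pvDval ((n % 10).digitChar) := by
        simp [pvVal]
      rw [this, pvDval_digitChar _ (Nat.mod_lt n (by norm_num))]
      omega
    · simp only [h, if_false]
      have hdiv : n / 10 < n := Nat.div_lt_self (by omega) (by norm_num)
      rw [pv_toDigitsCore_append, pvVal_append, ih (n / 10) (by omega),
        pvDval_digitChar _ (Nat.mod_lt n (by omega))]
      omega

theorem pv_toDigits_inj {a b : Nat} (h : Nat.toDigits 10 a = Nat.toDigits 10 b) : a = b := by
  have ha := pvVal_toDigitsCore (a + 1) a (by omega)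
  have hb := pvVal_toDigitsCore (b + 1) b (by omega)
  unfold Nat.toDigits at h
  rw [h] at ha
  omega

theorem pv_toChars_inj {a b : Int} (ha : 0 ≤ a) (hb : 0 ≤ b)
    (h : PySem.Int.toChars a = PySem.Int.toChars b) : a = b := by
  simp only [PySem.Int.toChars, if_neg (not_lt.mpr ha), if_neg (not_lt.mpr hb)] at h
  have := pv_toDigits_inj h
  omega

theorem pv_name_inj (category : String) {a b : Int} (ha : 0 ≤ a) (hb : 0 ≤ b)
    (h : category ++ "-" ++ PySem.Int.toStr a = category ++ "-" ++ PySem.Int.toStr b) : a = b := by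
  have h2 := congrArg String.toList h
  simp only [String.toList_append, PySem.Int.toStr, String.toList_ofList,
    List.append_cancel_left_eq] at h2
  exact pv_toChars_inj ha hb h2

-- folding inserts with pairwise-distinct keys from empty yields exactly the list of pairs
theorem pv_fold_insert_items {V : Type} (nm : Nat → String) (ch : Nat → V)
    (hinj : ∀ i j, nm i = nm j → i = j) (m : Nat) :
    ((List.range m).foldl (fun d k => d.insert (nm k) (ch k))
        (PySem.Dict.empty : PySem.Dict String V)).items
      = (List.range m).map (fun k => (nm k, ch k)) := by
  induction m with
  | zero => rfl
  | succ m ih =>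
    rw [List.range_succ, List.foldl_append, List.map_append]
    simp only [List.foldl_cons, List.foldl_nil, List.map_cons, List.map_nil]
    rw [PySem.Dict.items_insert_of_not_contains _ _ ?_, ih]
    rw [PySem.Dict.contains_eq_decide_mem_keys]
    simp only [PySem.Dict.keys, ih, List.map_map, decide_eq_false_iff_not]
    intro hmem
    obtain ⟨k, hk, hkeq⟩ := List.mem_map.mp hmem
    have := hinj _ _ hkeq
    rw [List.mem_range] at hk
    omega

-- ceiling division, the number of chunks B's recursion produces
def pvCeil (L m : Nat) : Nat := (L + m - 1) / m

theorem pv_ceil_zero (m : Nat) : pvCeil 0 m = 0 := by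
  unfold pvCeil
  rcases Nat.eq_zero_or_pos m with h | h
  · simp [h]
  · exact Nat.div_eq_of_lt (by omega)

theorem pv_ceil_succ (L m : Nat) (hL : 1 ≤ L) (hm : 1 ≤ m) :
    pvCeil L m = pvCeil (L - m) m + 1 := by
  unfold pvCeil
  rcases le_or_gt L m with h | h
  · rw [Nat.sub_eq_zero_of_le h]
    have h1 : (L + m - 1) / m = 1 := Nat.div_eq_of_lt_le (by omega) (by omega)
    have h2 : (0 + m - 1) / m = 0 := Nat.div_eq_of_lt (by omega)
    omega
  · have heq : L + m - 1 = (L - m + m - 1) + m := by omega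
    rw [heq, Nat.add_div_right _ (by omega)]

theorem pv_chunks_nonpos (category : String) (mx : Int) (h : mx ≤ 0)
    (fuel : Nat) (rest : List (List (String × String))) (n : Int) :
    pvChunks category mx fuel rest n = [] := by
  cases fuel <;> simp [pvChunks, h]

theorem pv_chunks_eq (category : String) (mx : Int) (hpos : 0 < mx) :
    ∀ (fuel : Nat) (rest : List (List (String × String))) (n : Int), rest.length ≤ fuel →
      pvChunks category mx fuel rest n
        = (List.range (pvCeil rest.length mx.toNat)).map
            (fun (k : Nat) => (category ++ "-" ++ PySem.Int.toStr (n + (k : Int)),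
                       (rest.drop (mx.toNat * k)).take mx.toNat)) := by
  intro fuel
  induction fuel with
  | zero =>
    intro rest n hle
    have : rest = [] := List.length_eq_zero_iff.mp (by omega)
    subst this
    simp [pvChunks, pv_ceil_zero]
  | succ f ih =>
    intro rest n hle
    rcases eq_or_ne rest [] with hnil | hrne
    · subst hnil
      simp [pvChunks, pv_ceil_zero]
    · have hLen : 1 ≤ rest.length := List.length_pos_iff.mpr hrne
      have hm : 1 ≤ mx.toNat := by omega
      have hstep : pvChunks category mx (f + 1) rest n
          = (category ++ "-" ++ PySem.Int.toStr n, rest.take mx.toNat) ::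
              pvChunks category mx f (rest.drop mx.toNat) (n + 1) := by
        rw [pvChunks, if_neg (by simp [hrne, not_le.mpr hpos]),
          PySem.List.slice_to _ (le_of_lt hpos), PySem.List.slice_from _ (le_of_lt hpos)]
      rw [hstep, ih _ (n + 1) (by rw [List.length_drop]; omega)]
      rw [pv_ceil_succ rest.length mx.toNat hLen hm, List.range_succ_eq_map, List.map_cons,
        List.map_map, List.length_drop]
      congr 1
      · simp
      · refine List.map_congr_left fun k _ => ?_
        simp only [Function.comp_apply, List.drop_drop]
        have h1 : n + 1 + (k : Int) = n + ((k + 1 : Nat) : Int) := by push_cast; ring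
        have h2 : mx.toNat + mx.toNat * k = mx.toNat * (k + 1) := by ring
        simp only [Nat.succ_eq_add_one, h1, h2]


theorem split_large_category_spec : Claim_equal_split_large_category := by
  intro commands category mx hdom hpre
  unfold Spec_split_large_category split_large_category split_large_category_alt
  by_cases h1 : (commands.length : Int) ≤ mx
  · simp only [h1, if_true]
  · simp only [h1, if_false]
    by_cases h2 : category = "development"
    · simp only [h2, if_true]
      exact (pv_dev_A commands).trans (pv_dev_B commands).symm
    · simp only [h2, if_false]
      have hs0 : mx ≠ 0 := by
        rcases hpre with h | h | h
        · exact h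
        · subst h; simp at h1; omega
        · exact absurd h h2
      rcases lt_or_gt_of_ne hs0 with hneg | hpos
      · -- negative chunk size: A folds over an empty range, B's recursion stops at its guard
        have hA : PySem.List.pyRange 0 (commands.length : Int) mx = [] := by
          unfold PySem.List.pyRange
          rw [if_neg hs0, if_neg (by omega : ¬ (0:Int) < mx),
            if_neg (by omega : ¬ (commands.length : Int) < 0)]
          rfl
        rw [hA, pv_chunks_nonpos category mx (le_of_lt hneg)]
        rfl
      · -- positive chunk size
        have hcast : ∀ k : Nat, PySem.Int.floordiv (0 + mx * (k : Int)) mx + 1 = (k : Int) + 1 := by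
          intro k
          rw [zero_add, PySem.Int.floordiv_eq_ediv_of_pos hpos,
            Int.mul_ediv_cancel_left _ (ne_of_gt hpos)]
        rw [PySem.List.pyRange_of_pos 0 (commands.length : Int) hpos, List.foldl_map]
        have hfoldfun :
            (fun (d : PySem.Dict String (List (List (String × String)))) (k : Nat) =>
              d.insert (category ++ "-" ++ PySem.Int.toStr (PySem.Int.floordiv (0 + mx * (k : Int)) mx + 1))
                (PySem.List.slice commands (some (0 + mx * (k : Int))) (some (0 + mx * (k : Int) + mx))))
            = (fun d k =>
              d.insert (category ++ "-" ++ PySem.Int.toStr ((k : Int) + 1))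
                (PySem.List.slice commands (some (mx * (k : Int))) (some (mx * (k : Int) + mx)))) := by
          funext d k
          rw [hcast k, zero_add]
        rw [hfoldfun, pv_fold_insert_items
          (fun k => category ++ "-" ++ PySem.Int.toStr ((k : Int) + 1))
          (fun k => PySem.List.slice commands (some (mx * (k : Int))) (some (mx * (k : Int) + mx)))
          (fun i j h => by
            have := pv_name_inj category (by omega : (0:Int) ≤ (i : Int) + 1)
              (by omega : (0:Int) ≤ (j : Int) + 1) h
            omega)]
        rw [pv_chunks_eq category mx hpos commands.length commands 1 le_rfl]
        have hmx : mx = ((mx.toNat : Nat) : Int) := by omega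
        have hC : (if (0:Int) < (commands.length : Int)
            then (((commands.length : Int) - 0 + mx - 1) / mx).toNat else 0)
            = pvCeil commands.length mx.toNat := by
          rw [if_pos (by omega : (0:Int) < (commands.length : Int))]
          have e : (commands.length : Int) - 0 + mx - 1
              = ((commands.length + mx.toNat - 1 : Nat) : Int) := by omega
          rw [e, hmx, Int.ofNat_ediv_ofNat, Int.toNat_natCast]
          rfl
        rw [hC]
        refine List.map_congr_left fun k _ => ?_
        have e1 : mx * (k : Int) = ((mx.toNat * k : Nat) : Int) := by
          exact congrArg (· * (k : Int)) hmx
        rw [e1]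
        rw [show ((mx.toNat * k : Nat) : Int) + mx = ((mx.toNat * k : Nat) : Int) + ((mx.toNat : Nat) : Int) from congrArg (fun z => ((mx.toNat * k : Nat) : Int) + z) hmx]
        rw [PySem.List.slice_natCast_add]
        rw [show (1 : Int) + (k : Int) = (k : Int) + 1 by ring]
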